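-- pv_equiv track=rewrite | github.com/Isaac-DeFrain/cryptography | src/generators.py | discrete_log
-- ===== SOURCE A (Python) =====
-- def discrete_log(x, y, n):
--     finish = False # early exit
--     res = None
--     x = x % n
--     y = y % n
--     for p in range(0, n - 2):
--         if finish: break
--         elif (x ** p) % n == y:
--             finish = True
--             res = p
--     return res
-- ===== SOURCE B (Python) =====
-- def discrete_log(x, y, n):
--     y = y % n
--     acc = 1 % n  # x**0 % n
--     for p in range(0, n - 2):
--         if acc == y:
--             return p
--         acc = acc * x % n
--     return None
-- ===== Notes on version B (the rewrite author's own statement) =====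
-- stated objective: faster
-- what changed: B keeps a running power acc = x**p % n updated by one modular multiplication per step and returns at the first match, instead of recomputing x**p from scratch (a p-multiplication bigint power) at every iteration of the scan.
import Mathlib
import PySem

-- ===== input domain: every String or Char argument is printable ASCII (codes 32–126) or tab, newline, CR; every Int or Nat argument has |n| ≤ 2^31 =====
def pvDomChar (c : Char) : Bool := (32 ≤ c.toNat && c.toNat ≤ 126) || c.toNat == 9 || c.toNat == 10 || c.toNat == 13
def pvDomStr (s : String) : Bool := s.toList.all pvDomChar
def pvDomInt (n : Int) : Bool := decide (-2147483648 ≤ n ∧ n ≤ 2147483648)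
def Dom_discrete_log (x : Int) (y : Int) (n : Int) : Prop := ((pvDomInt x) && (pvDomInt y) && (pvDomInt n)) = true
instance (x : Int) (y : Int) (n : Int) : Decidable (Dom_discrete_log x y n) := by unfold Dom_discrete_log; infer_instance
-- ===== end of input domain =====

-- B replaces A's per-iteration bigint power x**p by a running product updated with one
-- modular multiplication per step (objective: faster; return value only, no side effects).

-- ===== PORT A =====
def discrete_log (x : Int) (y : Int) (n : Int) : Option Int :=
  let x := PySem.Int.mod x n
  let y := PySem.Int.mod y n
  let st : Bool × Option Int :=
    (PySem.List.pyRange 0 (n - 2) 1).foldl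
      (fun s p =>
        if s.1 then s
        else if PySem.Int.mod (x ^ p.toNat) n = y then (true, some p)
        else s)
      (false, none)
  st.2

-- ===== PORT B =====
-- B's loop with early return, as structural recursion over the iteration range.
def dlogGo (acc : Int) (y : Int) (x : Int) (n : Int) : List Int → Option Int
  | [] => none
  | p :: ps => if acc = y then some p else dlogGo (PySem.Int.mod (acc * x) n) y x n ps

def discrete_log_alt (x : Int) (y : Int) (n : Int) : Option Int :=
  dlogGo (PySem.Int.mod 1 n) (PySem.Int.mod y n) x n (PySem.List.pyRange 0 (n - 2) 1)

-- ===== PRECONDITION & SPEC =====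
-- Pre_ excludes exactly n = 0, where the Python A raises ZeroDivisionError at 'x % n'.
def Pre_discrete_log (x : Int) (y : Int) (n : Int) : Prop := n ≠ 0
instance (x : Int) (y : Int) (n : Int) : Decidable (Pre_discrete_log x y n) := by unfold Pre_discrete_log; infer_instance
def pvWitness_discrete_log : Int × Int × Int := (2, 3, 7)

def Spec_discrete_log (x : Int) (y : Int) (n : Int) (out : Option Int) : Prop := out = discrete_log_alt x y n
instance (x : Int) (y : Int) (n : Int) (out : Option Int) : Decidable (Spec_discrete_log x y n out) := by unfold Spec_discrete_log; infer_instance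

-- ===== CLAIM (what is proved, stated in full; the proofs are below) =====
def Claim_equal_discrete_log : Prop := ∀ (x : Int) (y : Int) (n : Int), Dom_discrete_log x y n → Pre_discrete_log x y n → Spec_discrete_log x y n (discrete_log x y n)

-- ===== LEMMAS AND PROOFS =====

-- Python mod is Int.fmod; a reduced left factor does not change a product's residue.
theorem fmod_mul_left (a b n : Int) : ((a.fmod n) * b).fmod n = (a * b).fmod n := by
  rw [Int.mul_fmod, Int.fmod_fmod_of_dvd a dvd_rfl, ← Int.mul_fmod]

-- Reducing the base mod n does not change the residue of a power.
theorem fmod_pow (x n : Int) (k : Nat) : ((x.fmod n) ^ k).fmod n = (x ^ k).fmod n := by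
  induction k with
  | zero => simp
  | succ k ih =>
      rw [pow_succ, pow_succ, Int.mul_fmod, ih, Int.fmod_fmod_of_dvd x dvd_rfl,
          ← Int.mul_fmod]

-- A's early-exit fold absorbs once the flag is set.
theorem foldA_absorb (x y n : Int) (r : Option Int) (l : List Int) :
    l.foldl (fun (s : Bool × Option Int) p =>
        if s.1 then s
        else if PySem.Int.mod (x ^ p.toNat) n = y then (true, some p)
        else s) (true, r) = (true, r) := by
  induction l with
  | nil => rfl
  | cons p ps ih => simpa using ih

-- A's fold computes the first p in the list with x^p % n = y.
theorem foldA_find (x y n : Int) (l : List Int) :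
    (l.foldl (fun (s : Bool × Option Int) p =>
        if s.1 then s
        else if PySem.Int.mod (x ^ p.toNat) n = y then (true, some p)
        else s) (false, none)).2
    = l.find? (fun p => decide (PySem.Int.mod (x ^ p.toNat) n = y)) := by
  induction l with
  | nil => rfl
  | cons p ps ih =>
      by_cases h : PySem.Int.mod (x ^ p.toNat) n = y
      · simp [List.foldl_cons, List.find?, h, foldA_absorb]
      · simp [List.foldl_cons, List.find?, h, ih]

-- B's loop, run from index a with the correct running power, finds the same first p.
theorem dlogGo_find (x y n : Int) (hn : n ≠ 0) (a b : Int) (ha : 0 ≤ a) :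
    dlogGo (PySem.Int.mod (x ^ a.toNat) n) y x n (PySem.List.pyRange a b 1)
    = (PySem.List.pyRange a b 1).find? (fun p => decide (PySem.Int.mod (x ^ p.toNat) n = y)) := by
  by_cases hab : a < b
  · have hlt : (b - (a + 1)).toNat < (b - a).toNat := by omega
    rw [PySem.List.pyRange_one_cons hab]
    by_cases h : PySem.Int.mod (x ^ a.toNat) n = y
    · simp [dlogGo, List.find?, h]
    · have hacc : PySem.Int.mod (PySem.Int.mod (x ^ a.toNat) n * x) n
          = PySem.Int.mod (x ^ (a + 1).toNat) n := by
        show ((x ^ a.toNat).fmod n * x).fmod n = (x ^ (a + 1).toNat).fmod n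
        rw [fmod_mul_left]
        congr 1
        rw [show (a + 1).toNat = a.toNat + 1 by omega, pow_succ]
      simp only [dlogGo, List.find?, h]
      rw [hacc, dlogGo_find x y n hn (a + 1) b (by omega)]
      simp
  · rw [PySem.List.pyRange_one_eq_nil (by omega)]
    rfl
termination_by (b - a).toNat

theorem find?_congr_mem {α : Type} (l : List α) (p q : α → Bool)
    (h : ∀ a ∈ l, p a = q a) : l.find? p = l.find? q := by
  induction l with
  | nil => rfl
  | cons a as ih =>
      simp only [List.find?_cons, h a (by simp)]
      cases q a
      · exact ih (fun b hb => h b (by simp [hb]))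
      · rfl

theorem discrete_log_eq (x y n : Int) (hn : n ≠ 0) :
    discrete_log x y n = discrete_log_alt x y n := by
  unfold discrete_log discrete_log_alt
  rw [foldA_find]
  have h0 : PySem.Int.mod 1 n = PySem.Int.mod (x ^ (0 : Int).toNat) n := by
    norm_num
  rw [h0, dlogGo_find x (PySem.Int.mod y n) n hn 0 (n - 2) le_rfl]
  apply find?_congr_mem
  intro p hp
  have hp0 : 0 ≤ p := (PySem.List.mem_pyRange_one.mp hp).1
  have : PySem.Int.mod ((PySem.Int.mod x n) ^ p.toNat) n = PySem.Int.mod (x ^ p.toNat) n :=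
    fmod_pow x n p.toNat
  simp [this]

-- ===== VERDICT (by name: the statement is the Claim_ definition above) =====
theorem discrete_log_spec : Claim_equal_discrete_log := by
  intro x y n _ hn
  exact discrete_log_eq x y n hn
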